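-- pv_equiv track=rewrite | github.com/Helhaouti/Advent.Of.Code | 2023/4/puzzle1.py | determine_game_score
-- ===== SOURCE A (Python) =====
-- def determine_game_score(data: (int, [], [])) -> (int, int):
--     id, l1, l2 = data[0], data[1], data[2]
--     score = 0
--
--     for l2_item in l2:
--         if l2_item in l1:
--             if score == 0:
--                 score = 1
--                 continue
--
--             score *= 2
--
--     return (id, score)
-- ===== SOURCE B (Python) =====
-- def determine_game_score(data: (int, [], [])) -> (int, int):
--     id, l1, l2 = data[0], data[1], data[2]
--     matches = sum(1 for x in l2 if x in l1)
--     return (id, 2 ** (matches - 1) if matches else 0)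
-- ===== Notes on version B (the rewrite author's own statement) =====
-- stated objective: simpler
-- what changed: Replaced the incremental doubling loop with its first-match special case by counting matches in one pass and returning the closed form 2**(matches-1) (0 when no matches).
import Mathlib
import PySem

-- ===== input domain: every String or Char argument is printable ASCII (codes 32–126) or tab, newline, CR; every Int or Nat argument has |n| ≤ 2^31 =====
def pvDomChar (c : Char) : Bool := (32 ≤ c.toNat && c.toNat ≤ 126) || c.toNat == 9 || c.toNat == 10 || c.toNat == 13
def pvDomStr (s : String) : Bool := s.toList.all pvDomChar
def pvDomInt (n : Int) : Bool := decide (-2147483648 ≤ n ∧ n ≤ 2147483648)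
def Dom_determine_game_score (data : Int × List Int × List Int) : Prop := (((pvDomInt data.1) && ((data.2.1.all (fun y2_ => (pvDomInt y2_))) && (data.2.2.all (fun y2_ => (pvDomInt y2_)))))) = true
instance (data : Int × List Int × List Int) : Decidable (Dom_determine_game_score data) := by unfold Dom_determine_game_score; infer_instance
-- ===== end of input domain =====

-- B replaces A's incremental doubling loop by counting m_cnt then applying the closed form 2^(m_cnt-1) (0 if none): simpler.


-- ===== PORT A =====
def determine_game_score (data : Int × List Int × List Int) : Int × Int :=
  let id := data.1
  let l1 := data.2.1
  let l2 := data.2.2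
  let score : Int :=
    l2.foldl (fun score l2_item =>
      if l1.contains l2_item then
        (if score = 0 then 1 else score * 2)
      else score) 0
  (id, score)

-- ===== PORT B =====
def determine_game_score_alt (data : Int × List Int × List Int) : Int × Int :=
  let id := data.1
  let l1 := data.2.1
  let l2 := data.2.2
  let m_cnt : Nat := l2.countP (fun x => l1.contains x)
  (id, if m_cnt ≠ 0 then (2 : Int) ^ (m_cnt - 1) else 0)

-- ===== PRECONDITION & SPEC =====
def Spec_determine_game_score (data : Int × List Int × List Int) (out : Int × Int) : Prop := out = determine_game_score_alt data
instance (data : Int × List Int × List Int) (out : Int × Int) : Decidable (Spec_determine_game_score data out) := by unfold Spec_determine_game_score; infer_instance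

-- ===== CLAIM (what is proved, stated in full; the proofs are below) =====
def Claim_equal_determine_game_score : Prop := ∀ (data : Int × List Int × List Int), Dom_determine_game_score data → Spec_determine_game_score data (determine_game_score data)

-- ===== LEMMAS AND PROOFS =====

-- A's loop, once score is nonzero, just doubles per match.
lemma dgs_loop_pos (l1 : List Int) (l2 : List Int) (s : Int) (hs : s ≠ 0) :
    l2.foldl (fun score l2_item =>
      if l1.contains l2_item then
        (if score = 0 then 1 else score * 2)
      else score) s = s * 2 ^ (l2.countP (fun x => l1.contains x)) := by
  induction l2 generalizing s with
  | nil => simp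
  | cons x t ih =>
    by_cases hx : l1.contains x = true
    · have h2 : s * 2 ≠ 0 := mul_ne_zero hs (by norm_num)
      simp only [List.foldl_cons, List.countP_cons, hx, if_true, if_neg hs, ih _ h2]
      rw [pow_succ]
      ring
    · simp only [List.foldl_cons, List.countP_cons, hx, Bool.false_eq_true, if_false, ih _ hs, add_zero]

-- A's loop from 0 equals the closed form.
lemma dgs_loop_zero (l1 : List Int) (l2 : List Int) :
    l2.foldl (fun score l2_item =>
      if l1.contains l2_item then
        (if score = 0 then 1 else score * 2)
      else score) 0 =
    (if l2.countP (fun x => l1.contains x) ≠ 0 then (2 : Int) ^ (l2.countP (fun x => l1.contains x) - 1) else 0) := by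
  induction l2 with
  | nil => simp
  | cons x t ih =>
    by_cases hx : l1.contains x = true
    · simp only [List.foldl_cons, List.countP_cons, hx, if_true,
        dgs_loop_pos l1 t 1 one_ne_zero, one_mul]
      simp
    · simp only [List.foldl_cons, List.countP_cons, hx, Bool.false_eq_true, if_false, add_zero]
      exact ih

-- ===== VERDICT (by name: the statement is the Claim_ definition above) =====
theorem determine_game_score_spec : Claim_equal_determine_game_score := by
  intro data _
  unfold Spec_determine_game_score determine_game_score determine_game_score_alt
  simp only []
  exact congrArg (Prod.mk data.1) (dgs_loop_zero data.2.1 data.2.2)
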